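-- pv_equiv track=rewrite | github.com/Mokanarangan/Mora_SSL | graph.py | find_ngrams
-- ===== SOURCE A (Python) =====
-- def find_ngrams(input_list, n):
--     l = []
--     for ind in range(0, len(input_list)):
--         if(ind > 0):
--             x1 = input_list[ind - 1]
--         else:
--             x1 = {'token': '</s>', 'tag': None}
--         x2 = input_list[ind]
--         if(ind < len(input_list) - 1):
--             x3 = input_list[ind + 1]
--         else:
--             x3 = {'token': '</s>', 'tag': None}
--         l.append((x1, x2, x3))
--     return l
-- ===== SOURCE B (Python) =====
-- def find_ngrams(input_list, n):
--     s1 = {'token': '</s>', 'tag': None}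
--     s2 = {'token': '</s>', 'tag': None}
--     padded = [s1, *input_list, s2]
--     return list(zip(padded, padded[1:], padded[2:]))
-- ===== Notes on version B (the rewrite author's own statement) =====
-- stated objective: idiomatic
-- what changed: Replaces A's index loop with boundary branches by padding the list with two sentinel dicts and zipping three shifted views (a sliding window).
import Mathlib
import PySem

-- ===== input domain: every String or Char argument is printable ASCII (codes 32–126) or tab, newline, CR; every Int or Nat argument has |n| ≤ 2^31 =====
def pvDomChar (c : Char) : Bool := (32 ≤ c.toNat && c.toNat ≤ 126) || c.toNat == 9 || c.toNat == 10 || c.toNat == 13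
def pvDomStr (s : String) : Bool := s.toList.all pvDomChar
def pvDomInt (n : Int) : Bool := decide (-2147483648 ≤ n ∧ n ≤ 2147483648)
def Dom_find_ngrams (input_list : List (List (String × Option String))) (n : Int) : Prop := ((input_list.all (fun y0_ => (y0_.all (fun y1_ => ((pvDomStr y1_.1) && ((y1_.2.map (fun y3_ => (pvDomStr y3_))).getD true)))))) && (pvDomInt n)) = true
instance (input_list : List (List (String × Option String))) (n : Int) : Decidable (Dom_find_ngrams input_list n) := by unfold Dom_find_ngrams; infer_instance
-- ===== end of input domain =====

-- B replaces A's index loop and boundary branches with a sentinel-padded list and a three-way shifted zip (idiomatic; same return value).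

-- ===== PORT A =====
-- the sentinel dict {'token': '</s>', 'tag': None} as an association list
def pvSent : List (String × Option String) := [("token", "</s>"), ("tag", none)]

-- literal port of A's loop; all indices are in range, so pyGetD is exact here
def find_ngrams (input_list : List (List (String × Option String))) (n : Int) : List ((List (String × Option String)) × (List (String × Option String)) × (List (String × Option String))) :=
  (PySem.List.pyRange 0 (input_list.length : Int) 1).foldl (fun l ind =>
    let x1 := if ind > 0 then PySem.List.pyGetD input_list (ind - 1) pvSent else pvSent
    let x2 := PySem.List.pyGetD input_list ind pvSent
    let x3 := if ind < (input_list.length : Int) - 1 then PySem.List.pyGetD input_list (ind + 1) pvSent else pvSent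
    l ++ [(x1, x2, x3)]) []

-- ===== PORT B =====
-- padded = [s1, *input_list, s2]; zip(padded, padded[1:], padded[2:])
def find_ngrams_alt (input_list : List (List (String × Option String))) (n : Int) : List ((List (String × Option String)) × (List (String × Option String)) × (List (String × Option String))) :=
  let padded := pvSent :: input_list ++ [pvSent]
  List.zip padded (List.zip (padded.drop 1) (padded.drop 2))

-- ===== PRECONDITION & SPEC =====
def Spec_find_ngrams (input_list : List (List (String × Option String))) (n : Int) (out : List ((List (String × Option String)) × (List (String × Option String)) × (List (String × Option String)))) : Prop := out = find_ngrams_alt input_list n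
instance (input_list : List (List (String × Option String))) (n : Int) (out : List ((List (String × Option String)) × (List (String × Option String)) × (List (String × Option String)))) : Decidable (Spec_find_ngrams input_list n out) := by unfold Spec_find_ngrams; infer_instance

-- ===== CLAIM (what is proved, stated in full; the proofs are below) =====
def Claim_equal_find_ngrams : Prop := ∀ (input_list : List (List (String × Option String))) (n : Int), Dom_find_ngrams input_list n → Spec_find_ngrams input_list n (find_ngrams input_list n)

-- ===== LEMMAS AND PROOFS =====

-- A's loop computes the triple at each index of range(len(xs))
lemma find_ngrams_eq_map (xs : List (List (String × Option String))) (n : Int) :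
    find_ngrams xs n = (List.range xs.length).map (fun i =>
      ((if 0 < i then xs.getD (i - 1) pvSent else pvSent),
       xs.getD i pvSent,
       (if i + 1 < xs.length then xs.getD (i + 1) pvSent else pvSent))) := by
  unfold find_ngrams
  rw [PySem.List.pyRange_zero_natCast, List.foldl_map,
      PySem.List.foldl_append_singleton_eq_map, List.nil_append]
  apply List.map_congr_left
  intro i hi
  rw [List.mem_range] at hi
  congr 1
  · -- x1
    by_cases h : 0 < i
    · rw [if_pos (by exact_mod_cast h), if_pos h]
      have : (i : Int) - 1 = ((i - 1 : Nat) : Int) := by omega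
      rw [this, PySem.List.pyGetD_natCast]
    · rw [if_neg (by exact_mod_cast h), if_neg h]
  congr 1
  · rw [PySem.List.pyGetD_natCast]
  · -- x3
    by_cases h : i + 1 < xs.length
    · rw [if_pos (by exact_mod_cast (by omega : (i : Int) < (xs.length : Int) - 1)), if_pos h]
      have : (i : Int) + 1 = ((i + 1 : Nat) : Int) := by omega
      rw [this, PySem.List.pyGetD_natCast]
    · rw [if_neg (by omega), if_neg h]

-- the padded list, indexed
lemma padded_getElem (xs : List (List (String × Option String))) (i : Nat)
    (h : i < (pvSent :: xs ++ [pvSent]).length) :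
    (pvSent :: xs ++ [pvSent])[i] =
      if hi : 0 < i ∧ i < xs.length + 1 then xs[i - 1]'(by omega) else pvSent := by
  cases i with
  | zero => simp
  | succ j =>
    simp only [List.cons_append, List.getElem_cons_succ]
    by_cases hj : j < xs.length
    · rw [List.getElem_append_left hj, dif_pos ⟨Nat.succ_pos j, by omega⟩]
      simp
    · have hl : j + 1 < xs.length + 2 := by simpa using h
      have hje : j = xs.length := by omega
      rw [dif_neg (by omega)]
      subst hje
      simp

theorem find_ngrams_spec' (xs : List (List (String × Option String))) (n : Int) :
    find_ngrams xs n = find_ngrams_alt xs n := by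
  rw [find_ngrams_eq_map]
  unfold find_ngrams_alt
  apply List.ext_getElem
  · show _ = (List.zip _ _).length
    simp [Nat.min_def]
  · intro i h1 h2
    have hi : i < xs.length := by simpa using h1
    rw [List.getElem_map, List.getElem_zip, List.getElem_zip,
        List.getElem_drop, List.getElem_drop, List.getElem_range]
    rw [padded_getElem xs i (by simp; omega),
        padded_getElem xs (1 + i) (by simp; omega),
        padded_getElem xs (2 + i) (by simp; omega)]
    congr 1
    · by_cases h : 0 < i
      · rw [if_pos h, dif_pos ⟨h, by omega⟩, List.getD_eq_getElem _ _ (by omega)]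
      · rw [if_neg h, dif_neg (by omega)]
    congr 1
    · rw [dif_pos ⟨by omega, by omega⟩, List.getD_eq_getElem _ _ (by omega)]
      congr 1
      omega
    · by_cases h : i + 1 < xs.length
      · rw [if_pos h, dif_pos ⟨by omega, by omega⟩, List.getD_eq_getElem _ _ (by omega)]
        congr 1
        omega
      · rw [if_neg h, dif_neg (by omega)]

-- ===== VERDICT (by name: the statement is the Claim_ definition above) =====
theorem find_ngrams_spec : Claim_equal_find_ngrams := by
  intro xs n _
  exact find_ngrams_spec' xs n
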